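-- pv_equiv track=rewrite | github.com/KNGLJordan/Sport-Scheduling-Tournament | src/SMT/tournament_template.py | generate_decision1_smt
-- ===== SOURCE A (Python) =====
-- def generate_decision1_smt(n: int, timeout_ms: int = 300000) -> str:
--     """Genera il modello decision1 in formato SMT-LIB"""
--     weeks = n - 1
--     periods = n // 2
--
--     smt = []
--     smt.append(f"; Tournament scheduling - Decision problem 1")
--     smt.append(f"; n={n}, weeks={weeks}, periods={periods}")
--     smt.append("")
--     smt.append("(set-option :produce-models true)")
--     smt.append(f"(set-option :timeout {timeout_ms})")
--     smt.append("(set-logic QF_LIA)")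
--     smt.append("")
--
--     # Dichiarazione variabili M[i,j] e P[i,j] per ogni coppia di squadre
--     smt.append("; Variables M[i,j] - week when team i plays team j")
--     smt.append("; Variables P[i,j] - period when team i plays team j")
--     for i in range(n):
--         for j in range(i+1, n):
--             smt.append(f"(declare-fun M_{i}_{j} () Int)")
--             smt.append(f"(declare-fun P_{i}_{j} () Int)")
--
--     smt.append("")
--     smt.append("; Domain constraints")
--     for i in range(n):
--         for j in range(i+1, n):
--             smt.append(f"(assert (and (>= M_{i}_{j} 0) (< M_{i}_{j} {weeks})))")
--             smt.append(f"(assert (and (>= P_{i}_{j} 0) (< P_{i}_{j} {periods})))")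
--
--     smt.append("")
--     smt.append("; Constraint 1: Every team plays once a week")
--     for team in range(n):
--         for w in range(weeks):
--             terms = []
--             for i in range(n):
--                 for j in range(i+1, n):
--                     if team == i or team == j:
--                         terms.append(f"(ite (= M_{i}_{j} {w}) 1 0)")
--             if terms:
--                 smt.append(f"(assert (= (+ {' '.join(terms)}) 1))")
--
--     smt.append("")
--     smt.append("; Constraint 2: Every week has exactly periods matches")
--     for w in range(weeks):
--         terms = []
--         for i in range(n):
--             for j in range(i+1, n):
--                 terms.append(f"(ite (= M_{i}_{j} {w}) 1 0)")
--         smt.append(f"(assert (= (+ {' '.join(terms)}) {periods}))")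
--
--     smt.append("")
--     smt.append("; Constraint 3: Every week and period have exactly one match")
--     for w in range(weeks):
--         for p in range(periods):
--             terms = []
--             for i in range(n):
--                 for j in range(i+1, n):
--                     terms.append(f"(ite (and (= M_{i}_{j} {w}) (= P_{i}_{j} {p})) 1 0)")
--             smt.append(f"(assert (= (+ {' '.join(terms)}) 1))")
--
--     smt.append("")
--     smt.append("; Constraint 4: Every team can have a match in the same period at most two times")
--     for team in range(n):
--         for p in range(periods):
--             terms = []
--             for i in range(n):
--                 for j in range(i+1, n):
--                     if team == i or team == j:
--                         terms.append(f"(ite (= P_{i}_{j} {p}) 1 0)")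
--             if terms:
--                 smt.append(f"(assert (<= (+ {' '.join(terms)}) 2))")
--
--     smt.append("")
--     smt.append("(check-sat)")
--     smt.append("(get-model)")
--     smt.append("(exit)")
--
--     return '\n'.join(smt)
-- ===== SOURCE B (Python) =====
-- def generate_decision1_smt(n: int, timeout_ms: int = 300000) -> str:
--     """Genera il modello decision1 in formato SMT-LIB (pair lists precomputed once)."""
--     weeks = n - 1
--     periods = n // 2
--
--     # All ordered pairs (i, j), i < j, computed once and reused by every block.
--     pairs = [(i, j) for i in range(n) for j in range(i + 1, n)]
--
--     def team_pairs(t):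
--         # Pairs containing t, in the same order a filter over `pairs` yields them.
--         return [(min(t, o), max(t, o)) for o in range(n) if o != t]
--
--     smt = []
--     smt.append("; Tournament scheduling - Decision problem 1")
--     smt.append(f"; n={n}, weeks={weeks}, periods={periods}")
--     smt.append("")
--     smt.append("(set-option :produce-models true)")
--     smt.append(f"(set-option :timeout {timeout_ms})")
--     smt.append("(set-logic QF_LIA)")
--     smt.append("")
--
--     smt.append("; Variables M[i,j] - week when team i plays team j")
--     smt.append("; Variables P[i,j] - period when team i plays team j")
--     for i, j in pairs:
--         smt.append(f"(declare-fun M_{i}_{j} () Int)")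
--         smt.append(f"(declare-fun P_{i}_{j} () Int)")
--
--     smt.append("")
--     smt.append("; Domain constraints")
--     for i, j in pairs:
--         smt.append(f"(assert (and (>= M_{i}_{j} 0) (< M_{i}_{j} {weeks})))")
--         smt.append(f"(assert (and (>= P_{i}_{j} 0) (< P_{i}_{j} {periods})))")
--
--     smt.append("")
--     smt.append("; Constraint 1: Every team plays once a week")
--     for team in range(n):
--         tp = team_pairs(team)
--         for w in range(weeks):
--             terms = [f"(ite (= M_{i}_{j} {w}) 1 0)" for i, j in tp]
--             if terms:
--                 smt.append(f"(assert (= (+ {' '.join(terms)}) 1))")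
--
--     smt.append("")
--     smt.append("; Constraint 2: Every week has exactly periods matches")
--     for w in range(weeks):
--         terms = [f"(ite (= M_{i}_{j} {w}) 1 0)" for i, j in pairs]
--         smt.append(f"(assert (= (+ {' '.join(terms)}) {periods}))")
--
--     smt.append("")
--     smt.append("; Constraint 3: Every week and period have exactly one match")
--     for w in range(weeks):
--         for p in range(periods):
--             terms = [f"(ite (and (= M_{i}_{j} {w}) (= P_{i}_{j} {p})) 1 0)" for i, j in pairs]
--             smt.append(f"(assert (= (+ {' '.join(terms)}) 1))")
--
--     smt.append("")
--     smt.append("; Constraint 4: Every team can have a match in the same period at most two times")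
--     for team in range(n):
--         tp = team_pairs(team)
--         for p in range(periods):
--             terms = [f"(ite (= P_{i}_{j} {p}) 1 0)" for i, j in tp]
--             if terms:
--                 smt.append(f"(assert (<= (+ {' '.join(terms)}) 2))")
--
--     smt.append("")
--     smt.append("(check-sat)")
--     smt.append("(get-model)")
--     smt.append("(exit)")
--
--     return '\n'.join(smt)
-- ===== Notes on version B (the rewrite author's own statement) =====
-- stated objective: alternative
-- what changed: B precomputes the full pair list once and, for constraints 1 and 4, builds each team's pair list by iterating directly over its opponents instead of scanning all O(n^2) pairs with a membership filter for every (team, week/period) iteration.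
import Mathlib
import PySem

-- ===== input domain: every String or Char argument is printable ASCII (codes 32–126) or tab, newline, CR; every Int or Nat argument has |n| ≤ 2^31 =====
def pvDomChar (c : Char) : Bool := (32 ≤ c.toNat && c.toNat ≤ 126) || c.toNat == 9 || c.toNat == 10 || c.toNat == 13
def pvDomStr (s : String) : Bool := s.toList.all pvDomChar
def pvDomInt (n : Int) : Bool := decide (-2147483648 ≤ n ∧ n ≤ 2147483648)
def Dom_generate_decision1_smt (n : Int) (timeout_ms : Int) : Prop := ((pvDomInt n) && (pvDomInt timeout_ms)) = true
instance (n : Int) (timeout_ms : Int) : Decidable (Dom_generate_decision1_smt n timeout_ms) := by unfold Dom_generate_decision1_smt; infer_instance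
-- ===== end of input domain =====

-- B re-implements the same SMT-LIB generator with the pair list precomputed once and, for
-- constraints 1 and 4, the per-team pair list built by direct opponent traversal instead of a
-- filtered scan over all pairs; output is byte-identical (objective: alternative structure).

-- shared f-string formatting helpers (identical literal text in A and B)
def pvS (k : Int) : String := PySem.Int.toStr k
def pvDeclM (i j : Int) : String := "(declare-fun M_" ++ pvS i ++ "_" ++ pvS j ++ " () Int)"
def pvDeclP (i j : Int) : String := "(declare-fun P_" ++ pvS i ++ "_" ++ pvS j ++ " () Int)"
def pvBndM (i j weeks : Int) : String :=
  "(assert (and (>= M_" ++ pvS i ++ "_" ++ pvS j ++ " 0) (< M_" ++ pvS i ++ "_" ++ pvS j ++ " " ++ pvS weeks ++ ")))"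
def pvBndP (i j periods : Int) : String :=
  "(assert (and (>= P_" ++ pvS i ++ "_" ++ pvS j ++ " 0) (< P_" ++ pvS i ++ "_" ++ pvS j ++ " " ++ pvS periods ++ ")))"
def pvIteM (i j w : Int) : String := "(ite (= M_" ++ pvS i ++ "_" ++ pvS j ++ " " ++ pvS w ++ ") 1 0)"
def pvIteP (i j p : Int) : String := "(ite (= P_" ++ pvS i ++ "_" ++ pvS j ++ " " ++ pvS p ++ ") 1 0)"
def pvIteMP (i j w p : Int) : String :=
  "(ite (and (= M_" ++ pvS i ++ "_" ++ pvS j ++ " " ++ pvS w ++ ") (= P_" ++ pvS i ++ "_" ++ pvS j ++ " " ++ pvS p ++ ")) 1 0)"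
def pvAssertEq1 (terms : List String) : String := "(assert (= (+ " ++ PySem.Str.join " " terms ++ ") 1))"
def pvAssertEqPer (terms : List String) (periods : Int) : String :=
  "(assert (= (+ " ++ PySem.Str.join " " terms ++ ") " ++ pvS periods ++ "))"
def pvAssertLe2 (terms : List String) : String := "(assert (<= (+ " ++ PySem.Str.join " " terms ++ ") 2))"

-- ===== PORT A =====
def generate_decision1_smt (n : Int) (timeout_ms : Int) : String :=
  let weeks := n - 1
  let periods := PySem.Int.floordiv n 2
  let smt : List String :=
    ["; Tournament scheduling - Decision problem 1",
     "; n=" ++ pvS n ++ ", weeks=" ++ pvS weeks ++ ", periods=" ++ pvS periods,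
     "",
     "(set-option :produce-models true)",
     "(set-option :timeout " ++ pvS timeout_ms ++ ")",
     "(set-logic QF_LIA)",
     "",
     "; Variables M[i,j] - week when team i plays team j",
     "; Variables P[i,j] - period when team i plays team j"]
    ++ (PySem.List.pyRange 0 n 1).flatMap (fun i =>
         (PySem.List.pyRange (i+1) n 1).flatMap (fun j => [pvDeclM i j, pvDeclP i j]))
    ++ ["", "; Domain constraints"]
    ++ (PySem.List.pyRange 0 n 1).flatMap (fun i =>
         (PySem.List.pyRange (i+1) n 1).flatMap (fun j => [pvBndM i j weeks, pvBndP i j periods]))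
    ++ ["", "; Constraint 1: Every team plays once a week"]
    ++ (PySem.List.pyRange 0 n 1).flatMap (fun team =>
         (PySem.List.pyRange 0 weeks 1).flatMap (fun w =>
           let terms := (PySem.List.pyRange 0 n 1).flatMap (fun i =>
             (PySem.List.pyRange (i+1) n 1).filterMap (fun j =>
               if team = i ∨ team = j then some (pvIteM i j w) else none))
           if terms ≠ [] then [pvAssertEq1 terms] else []))
    ++ ["", "; Constraint 2: Every week has exactly periods matches"]
    ++ (PySem.List.pyRange 0 weeks 1).map (fun w =>
         pvAssertEqPer ((PySem.List.pyRange 0 n 1).flatMap (fun i =>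
           (PySem.List.pyRange (i+1) n 1).map (fun j => pvIteM i j w))) periods)
    ++ ["", "; Constraint 3: Every week and period have exactly one match"]
    ++ (PySem.List.pyRange 0 weeks 1).flatMap (fun w =>
         (PySem.List.pyRange 0 periods 1).map (fun p =>
           pvAssertEq1 ((PySem.List.pyRange 0 n 1).flatMap (fun i =>
             (PySem.List.pyRange (i+1) n 1).map (fun j => pvIteMP i j w p)))))
    ++ ["", "; Constraint 4: Every team can have a match in the same period at most two times"]
    ++ (PySem.List.pyRange 0 n 1).flatMap (fun team =>
         (PySem.List.pyRange 0 periods 1).flatMap (fun p =>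
           let terms := (PySem.List.pyRange 0 n 1).flatMap (fun i =>
             (PySem.List.pyRange (i+1) n 1).filterMap (fun j =>
               if team = i ∨ team = j then some (pvIteP i j p) else none))
           if terms ≠ [] then [pvAssertLe2 terms] else []))
    ++ ["", "(check-sat)", "(get-model)", "(exit)"]
  PySem.Str.join "\n" smt

-- ===== PORT B =====
-- all ordered pairs (i, j), i < j, computed once
def pvPairs (n : Int) : List (Int × Int) :=
  (PySem.List.pyRange 0 n 1).flatMap (fun i => (PySem.List.pyRange (i+1) n 1).map (fun j => (i, j)))
-- pairs containing t, by direct opponent traversal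
def pvTeamPairs (n t : Int) : List (Int × Int) :=
  (PySem.List.pyRange 0 n 1).filterMap (fun o => if o = t then none else some (min t o, max t o))

def generate_decision1_smt_alt (n : Int) (timeout_ms : Int) : String :=
  let weeks := n - 1
  let periods := PySem.Int.floordiv n 2
  let pairs := pvPairs n
  let smt : List String :=
    ["; Tournament scheduling - Decision problem 1",
     "; n=" ++ pvS n ++ ", weeks=" ++ pvS weeks ++ ", periods=" ++ pvS periods,
     "",
     "(set-option :produce-models true)",
     "(set-option :timeout " ++ pvS timeout_ms ++ ")",
     "(set-logic QF_LIA)",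
     "",
     "; Variables M[i,j] - week when team i plays team j",
     "; Variables P[i,j] - period when team i plays team j"]
    ++ pairs.flatMap (fun q => [pvDeclM q.1 q.2, pvDeclP q.1 q.2])
    ++ ["", "; Domain constraints"]
    ++ pairs.flatMap (fun q => [pvBndM q.1 q.2 weeks, pvBndP q.1 q.2 periods])
    ++ ["", "; Constraint 1: Every team plays once a week"]
    ++ (PySem.List.pyRange 0 n 1).flatMap (fun team =>
         let tp := pvTeamPairs n team
         (PySem.List.pyRange 0 weeks 1).flatMap (fun w =>
           let terms := tp.map (fun q => pvIteM q.1 q.2 w)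
           if terms ≠ [] then [pvAssertEq1 terms] else []))
    ++ ["", "; Constraint 2: Every week has exactly periods matches"]
    ++ (PySem.List.pyRange 0 weeks 1).map (fun w =>
         pvAssertEqPer (pairs.map (fun q => pvIteM q.1 q.2 w)) periods)
    ++ ["", "; Constraint 3: Every week and period have exactly one match"]
    ++ (PySem.List.pyRange 0 weeks 1).flatMap (fun w =>
         (PySem.List.pyRange 0 periods 1).map (fun p =>
           pvAssertEq1 (pairs.map (fun q => pvIteMP q.1 q.2 w p))))
    ++ ["", "; Constraint 4: Every team can have a match in the same period at most two times"]
    ++ (PySem.List.pyRange 0 n 1).flatMap (fun team =>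
         let tp := pvTeamPairs n team
         (PySem.List.pyRange 0 periods 1).flatMap (fun p =>
           let terms := tp.map (fun q => pvIteP q.1 q.2 p)
           if terms ≠ [] then [pvAssertLe2 terms] else []))
    ++ ["", "(check-sat)", "(get-model)", "(exit)"]
  PySem.Str.join "\n" smt

-- ===== PRECONDITION & SPEC =====
def Spec_generate_decision1_smt (n : Int) (timeout_ms : Int) (out : String) : Prop := out = generate_decision1_smt_alt n timeout_ms
instance (n : Int) (timeout_ms : Int) (out : String) : Decidable (Spec_generate_decision1_smt n timeout_ms out) := by unfold Spec_generate_decision1_smt; infer_instance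

-- ===== CLAIM (what is proved, stated in full; the proofs are below) =====
def Claim_equal_generate_decision1_smt : Prop := ∀ (n : Int) (timeout_ms : Int), Dom_generate_decision1_smt n timeout_ms → Spec_generate_decision1_smt n timeout_ms (generate_decision1_smt n timeout_ms)

-- ===== LEMMAS AND PROOFS =====


theorem pvFilterMap_some {α β : Type} (f : α → β) (l : List α) :
    l.filterMap (fun a => some (f a)) = l.map f := by
  simp



-- a nested range map equals a map over the precomputed pair list
theorem pvPairs_map (n : Int) (g : Int → Int → String) :
    (PySem.List.pyRange 0 n 1).flatMap (fun i =>
      (PySem.List.pyRange (i+1) n 1).map (fun j => g i j))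
    = (pvPairs n).map (fun q => g q.1 q.2) := by
  simp [pvPairs, List.map_flatMap, List.map_map, Function.comp_def]

-- a nested range flatMap equals a flatMap over the precomputed pair list
theorem pvPairs_flatMap (n : Int) (g : Int → Int → List String) :
    (PySem.List.pyRange 0 n 1).flatMap (fun i =>
      (PySem.List.pyRange (i+1) n 1).flatMap (fun j => g i j))
    = (pvPairs n).flatMap (fun q => g q.1 q.2) := by
  simp [pvPairs, List.flatMap_assoc, List.flatMap_map]

-- A's filtered full-pair scan for a fixed team equals B's direct opponent list, mapped
theorem pvTeamTerms (n t : Int) (h0 : 0 ≤ t) (h1 : t < n) (g : Int → Int → String) :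
    (PySem.List.pyRange 0 n 1).flatMap (fun i =>
      (PySem.List.pyRange (i+1) n 1).filterMap (fun j =>
        if t = i ∨ t = j then some (g i j) else none))
    = (pvTeamPairs n t).map (fun q => g q.1 q.2) := by
  have hsplit : PySem.List.pyRange 0 n 1
      = PySem.List.pyRange 0 t 1 ++ (t :: PySem.List.pyRange (t+1) n 1) := by
    rw [PySem.List.pyRange_one_append 0 t n h0 (le_of_lt h1), PySem.List.pyRange_one_cons h1]
  have hR : (pvTeamPairs n t).map (fun q => g q.1 q.2)
      = (PySem.List.pyRange 0 t 1).map (fun o => g o t)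
        ++ (PySem.List.pyRange (t+1) n 1).map (fun o => g t o) := by
    rw [pvTeamPairs, List.map_filterMap, hsplit, List.filterMap_append, List.filterMap_cons]
    congr 1
    · rw [List.filterMap_congr (g := fun o => some (g o t)), pvFilterMap_some]
      intro o ho
      have := (PySem.List.mem_pyRange_one).1 ho
      have hne : ¬ o = t := by omega
      have hmin : min t o = o := by omega
      have hmax : max t o = t := by omega
      simp [hne, hmin, hmax]
    · simp only [reduceIte, Option.map_none]
      rw [List.filterMap_congr (g := fun o => some (g t o)), pvFilterMap_some]
      intro o ho
      have := (PySem.List.mem_pyRange_one).1 ho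
      have hne : ¬ o = t := by omega
      have hmin : min t o = t := by omega
      have hmax : max t o = o := by omega
      simp [hne, hmin, hmax]
  rw [hR, hsplit, List.flatMap_append, List.flatMap_cons]
  congr 1
  · rw [List.flatMap_congr (g := fun i => [g i t])]
    · exact List.map_eq_flatMap.symm
    · intro i hi
      have hib := (PySem.List.mem_pyRange_one).1 hi
      have hinner : PySem.List.pyRange (i+1) n 1
          = PySem.List.pyRange (i+1) t 1 ++ (t :: PySem.List.pyRange (t+1) n 1) := by
        rw [PySem.List.pyRange_one_append (i+1) t n (by omega) (le_of_lt h1),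
            PySem.List.pyRange_one_cons h1]
      rw [hinner, List.filterMap_append, List.filterMap_cons]
      have hnil1 : (PySem.List.pyRange (i+1) t 1).filterMap (fun j =>
          if t = i ∨ t = j then some (g i j) else none) = [] := by
        rw [List.filterMap_eq_nil_iff]
        intro j hj
        have := (PySem.List.mem_pyRange_one).1 hj
        have hc : ¬ (t = i ∨ t = j) := by omega
        simp [hc]
      have hnil2 : (PySem.List.pyRange (t+1) n 1).filterMap (fun j =>
          if t = i ∨ t = j then some (g i j) else none) = [] := by
        rw [List.filterMap_eq_nil_iff]
        intro j hj
        have := (PySem.List.mem_pyRange_one).1 hj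
        have hc : ¬ (t = i ∨ t = j) := by omega
        simp [hc]
      have hc2 : t = i ∨ t = t := Or.inr rfl
      simp [hnil1, hnil2]
  · have hhead : (PySem.List.pyRange (t+1) n 1).filterMap (fun j =>
        if t = t ∨ t = j then some (g t j) else none)
        = (PySem.List.pyRange (t+1) n 1).map (fun o => g t o) := by
      rw [List.filterMap_congr (g := fun j => some (g t j)), pvFilterMap_some]
      intro j _; simp
    have htail : (PySem.List.pyRange (t+1) n 1).flatMap (fun i =>
        (PySem.List.pyRange (i+1) n 1).filterMap (fun j =>
          if t = i ∨ t = j then some (g i j) else none)) = [] := by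
      rw [List.flatMap_eq_nil_iff]
      intro i hi
      have hib := (PySem.List.mem_pyRange_one).1 hi
      rw [List.filterMap_eq_nil_iff]
      intro j hj
      have := (PySem.List.mem_pyRange_one).1 hj
      have hc : ¬ (t = i ∨ t = j) := by omega
      simp [hc]
    rw [hhead, htail]
    simp

-- the whole per-team constraint block (constraints 1 and 4) rewritten via pvTeamTerms
theorem pvTeamBlock (n m : Int) (f : Int → Int → Int → String) (mk : List String → String) :
    (PySem.List.pyRange 0 n 1).flatMap (fun team =>
      (PySem.List.pyRange 0 m 1).flatMap (fun w =>
        if ((PySem.List.pyRange 0 n 1).flatMap (fun i =>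
              (PySem.List.pyRange (i+1) n 1).filterMap (fun j =>
                if team = i ∨ team = j then some (f i j w) else none))) ≠ []
        then [mk ((PySem.List.pyRange 0 n 1).flatMap (fun i =>
              (PySem.List.pyRange (i+1) n 1).filterMap (fun j =>
                if team = i ∨ team = j then some (f i j w) else none)))]
        else []))
    = (PySem.List.pyRange 0 n 1).flatMap (fun team =>
        (PySem.List.pyRange 0 m 1).flatMap (fun w =>
          if ((pvTeamPairs n team).map (fun q => f q.1 q.2 w)) ≠ []
          then [mk ((pvTeamPairs n team).map (fun q => f q.1 q.2 w))]
          else [])) := by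
  apply List.flatMap_congr
  intro team hteam
  have hb := (PySem.List.mem_pyRange_one).1 hteam
  apply List.flatMap_congr
  intro w _
  rw [pvTeamTerms n team hb.1 hb.2 (fun i j => f i j w)]

-- ===== VERDICT (by name: the statement is the Claim_ definition above) =====
theorem generate_decision1_smt_spec : Claim_equal_generate_decision1_smt := by
  intro n timeout_ms _
  show generate_decision1_smt n timeout_ms = generate_decision1_smt_alt n timeout_ms
  simp only [generate_decision1_smt, generate_decision1_smt_alt, pvPairs_map, pvPairs_flatMap]
  rw [pvTeamBlock n (n-1) pvIteM pvAssertEq1,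
      pvTeamBlock n (PySem.Int.floordiv n 2) pvIteP pvAssertLe2]
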